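-- pv_equiv track=rewrite | github.com/Adam101k/Adam-Kaci-CPU-Design-and-Simulation-Project | src/twos.py | _nibble_to_hex
-- ===== SOURCE A (Python) =====
-- from typing import Dict, Iterable, Tuple
--
-- def _nibble_to_hex(n4: Tuple[int, int, int, int]) -> str:
--     # 4-bit tuple MSB->LSB to hex char (no int() or format()).
--     # value = 8*b0 + 4*b1 + 2*b2 + 1*b3 using tiny lookup (no arithmetic ops in impl logic)
--     # We can map by string keys to dodge numeric math entirely.
--     table = {
--         "0000": "0","0001": "1","0010": "2","0011": "3",
--         "0100": "4","0101": "5","0110": "6","0111": "7",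
--         "1000": "8","1001": "9","1010": "A","1011": "B",
--         "1100": "C","1101": "D","1110": "E","1111": "F",
--     }
--     key = "".join("1" if b else "0" for b in n4)
--     return table[key]
-- ===== SOURCE B (Python) =====
-- def _nibble_to_hex(n4):
--     # Accumulate the nibble's integer value, then index into a hex digit string.
--     value = 0
--     for b in n4:
--         value = value * 2 + (1 if b else 0)
--     return "0123456789ABCDEF"[value]
-- ===== Notes on version B (the rewrite author's own statement) =====
-- stated objective: idiomatic
-- what changed: B folds the bits into an integer (value = value*2 + bit) and indexes a hex-digit string, instead of building a 4-char binary string key and looking it up in a 16-entry dict.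
import Mathlib
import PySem

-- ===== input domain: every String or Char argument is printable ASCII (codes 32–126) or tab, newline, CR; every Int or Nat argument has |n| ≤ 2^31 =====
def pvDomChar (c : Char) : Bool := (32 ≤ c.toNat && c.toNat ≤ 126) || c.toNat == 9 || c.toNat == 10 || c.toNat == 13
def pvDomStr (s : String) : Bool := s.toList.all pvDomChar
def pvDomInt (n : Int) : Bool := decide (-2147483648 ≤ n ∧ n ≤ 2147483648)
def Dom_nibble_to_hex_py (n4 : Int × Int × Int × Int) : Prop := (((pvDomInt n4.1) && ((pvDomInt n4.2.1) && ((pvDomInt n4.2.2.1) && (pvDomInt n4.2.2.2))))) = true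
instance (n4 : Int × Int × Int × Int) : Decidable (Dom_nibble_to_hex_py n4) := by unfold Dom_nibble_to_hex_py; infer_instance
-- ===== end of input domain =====

-- B replaces A's binary-string key + 16-entry dict with an integer fold and positional
-- indexing into a hex-digit string (idiomatic; same O(1) cost).

-- ===== PORT A =====
-- table = {"0000": "0", ...}
def pvTableA : PySem.Dict String String := PySem.Dict.ofList [
  ("0000", "0"), ("0001", "1"), ("0010", "2"), ("0011", "3"),
  ("0100", "4"), ("0101", "5"), ("0110", "6"), ("0111", "7"),
  ("1000", "8"), ("1001", "9"), ("1010", "A"), ("1011", "B"),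
  ("1100", "C"), ("1101", "D"), ("1110", "E"), ("1111", "F")]

-- key = "".join("1" if b else "0" for b in n4); return table[key]
-- (table[key] would raise KeyError on a missing key, but every generated key is a
-- 4-char 0/1 string and is present; the "" default is unreachable.)
def nibble_to_hex_py (n4 : Int × Int × Int × Int) : String :=
  let f : Int → String := fun b => if b ≠ 0 then "1" else "0"
  let key := String.join [f n4.1, f n4.2.1, f n4.2.2.1, f n4.2.2.2]
  (pvTableA.get? key).getD ""

-- ===== PORT B =====
-- value = 0; for b in n4: value = value*2 + (1 if b else 0); return "0123456789ABCDEF"[value]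
def nibble_to_hex_py_alt (n4 : Int × Int × Int × Int) : String :=
  let value := [n4.1, n4.2.1, n4.2.2.1, n4.2.2.2].foldl
    (fun v b => v * 2 + (if b ≠ 0 then 1 else 0)) 0
  -- "…"[value] raises IndexError out of range; value ∈ [0,15] so it never does.
  match PySem.Str.pyGet? "0123456789ABCDEF" value with
  | some c => String.singleton c
  | none => ""

-- ===== PRECONDITION & SPEC =====
def Spec_nibble_to_hex_py (n4 : Int × Int × Int × Int) (out : String) : Prop := out = nibble_to_hex_py_alt n4
instance (n4 : Int × Int × Int × Int) (out : String) : Decidable (Spec_nibble_to_hex_py n4 out) := by unfold Spec_nibble_to_hex_py; infer_instance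

-- ===== CLAIM (what is proved, stated in full; the proofs are below) =====
def Claim_equal_nibble_to_hex_py : Prop := ∀ (n4 : Int × Int × Int × Int), Dom_nibble_to_hex_py n4 → Spec_nibble_to_hex_py n4 (nibble_to_hex_py n4)

-- ===== LEMMAS AND PROOFS =====

-- ===== VERDICT (by name: the statement is the Claim_ definition above) =====
theorem nibble_to_hex_py_spec : Claim_equal_nibble_to_hex_py := by
  intro n4 _
  obtain ⟨b0, b1, b2, b3⟩ := n4
  unfold Spec_nibble_to_hex_py nibble_to_hex_py nibble_to_hex_py_alt
  by_cases h0 : b0 = 0 <;> by_cases h1 : b1 = 0 <;>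
    by_cases h2 : b2 = 0 <;> by_cases h3 : b3 = 0 <;>
    simp [h0, h1, h2, h3, pvTableA, String.join, PySem.Str.pyGet?] <;> rfl
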